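-- pv_equiv track=rewrite | github.com/RealSong88/KW | 2020.08/.py/lib_Fruits/feat2.py | my_dupl
-- ===== SOURCE A (Python) =====
-- def my_dupl(old_data, new_data):
--     for i in range(len(old_data)):
--         is_dupl = False
--         for j in range(len(new_data)):
--             if new_data[j][0] == old_data[i][0]:
--                 new_data[j][1] += old_data[i][1]
--                 is_dupl = True
--         if is_dupl :
--             pass
--         else :
--             new_data.append(old_data[i])
--     return new_data
-- ===== SOURCE B (Python) =====
-- def my_dupl(old_data, new_data):
--     # One-pass merge via a key -> indices map instead of rescanning new_data for
--     # every old row; mutates new_data in place like the original.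
--     if not old_data:
--         return new_data
--     index = {}
--     for i, row in enumerate(new_data):
--         index.setdefault(row[0], []).append(i)
--     for row in old_data:
--         hits = index.get(row[0])
--         if hits:
--             for j in hits:
--                 new_data[j][1] += row[1]
--         else:
--             index[row[0]] = [len(new_data)]
--             new_data.append(row)
--     return new_data
-- ===== Notes on version B (the rewrite author's own statement) =====
-- stated objective: faster
-- what changed: Replaces A's inner rescan of new_data for every old row by a key->indices hash map built once over new_data and updated when a row is appended, so each old row is merged in (amortised) constant time per hit.
-- outside the precondition, e.g. on my_dupl([[]], []): A returns [[]], B raises IndexError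
import Mathlib
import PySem

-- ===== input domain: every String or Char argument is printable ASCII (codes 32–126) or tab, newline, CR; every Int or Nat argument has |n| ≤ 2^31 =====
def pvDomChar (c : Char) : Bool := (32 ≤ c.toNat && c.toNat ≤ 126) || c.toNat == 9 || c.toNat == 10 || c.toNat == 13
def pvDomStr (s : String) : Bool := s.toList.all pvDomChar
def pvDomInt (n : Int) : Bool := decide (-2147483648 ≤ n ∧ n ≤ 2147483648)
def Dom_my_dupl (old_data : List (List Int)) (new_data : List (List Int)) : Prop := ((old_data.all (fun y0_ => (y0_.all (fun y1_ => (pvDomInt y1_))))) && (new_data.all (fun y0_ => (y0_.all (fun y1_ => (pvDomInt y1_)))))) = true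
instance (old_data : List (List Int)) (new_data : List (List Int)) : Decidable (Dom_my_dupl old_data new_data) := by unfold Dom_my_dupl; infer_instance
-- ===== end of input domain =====

-- B replaces A's inner rescan of new_data by a key -> indices map built once and
-- updated on append (asymptotically faster). Both Pythons mutate new_data in place
-- identically; the theorems below are about the returned value.

-- ===== PORT A =====

-- row[0] (rows admitted by Pre_ are nonempty, so getD's default is never the value)
def pvKey (r : List Int) : Int := r.getD 0 0

-- 'r[1] += v' on the two-element-or-longer rows Pre_ admits; identity on shorter rows
def pvBump (r : List Int) (v : Int) : List Int :=
  match r with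
  | a :: b :: t => a :: (b + v) :: t
  | r => r

-- the inner 'for j in range(len(new_data))' loop: visit every position once,
-- bump the matching rows, record whether any matched
def myDuplScan (key v : Int) : List (List Int) → List (List Int) × Bool
  | [] => ([], false)
  | r :: t =>
      let (t', d) := myDuplScan key v t
      if pvKey r = key then (pvBump r v :: t', true) else (r :: t', d)

def my_dupl (old_data : List (List Int)) (new_data : List (List Int)) : List (List Int) :=
  old_data.foldl
    (fun nd row =>
      let (nd', is_dupl) := myDuplScan (pvKey row) (row.getD 1 0) nd
      if is_dupl then nd' else nd' ++ [row])
    new_data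

-- ===== PORT B =====

-- 'new_data[j][1] += row[1]' at a stored index j (always a valid nonnegative index)
def pvBumpAt (nd : List (List Int)) (j v : Int) : List (List Int) :=
  nd.set j.toNat (pvBump (nd.getD j.toNat []) v)

def pvStepB (st : List (List Int) × PySem.Dict Int (List Int)) (row : List Int) :
    List (List Int) × PySem.Dict Int (List Int) :=
  let hits := st.2.getD (pvKey row) []     -- index.get(row[0]); [] stands for both None and an (impossible) empty list, falsy either way
  if hits ≠ [] then
    (hits.foldl (fun nd j => pvBumpAt nd j (row.getD 1 0)) st.1, st.2)
  else
    (st.1 ++ [row], st.2.insert (pvKey row) [(st.1.length : Int)])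

def my_dupl_alt (old_data : List (List Int)) (new_data : List (List Int)) : List (List Int) :=
  match old_data with
  | [] => new_data
  | _ =>
      let idx := (PySem.List.enumerate new_data 0).foldl
        (fun d p => d.modify (pvKey p.2) [] (· ++ [p.1])) PySem.Dict.empty
      (old_data.foldl pvStepB (new_data, idx)).1

-- ===== PRECONDITION & SPEC =====
-- Pre_ excludes the inputs on which A raises IndexError (an empty row is reached, or a
-- length-1 row's second element is demanded because its key gets merged), plus the lone
-- shape old_data = [[]], new_data = [] where A returns [[]] but B's key lookup raises.
def Pre_my_dupl (old_data : List (List Int)) (new_data : List (List Int)) : Prop :=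
  old_data = [] ∨
    ((∀ r ∈ old_data ++ new_data, r ≠ []) ∧
     (∀ r ∈ old_data, r.length = 1 → (old_data ++ new_data).countP (fun q => pvKey q = pvKey r) = 1) ∧
     (∀ r ∈ new_data, r.length = 1 → ∀ q ∈ old_data, pvKey q ≠ pvKey r))
instance (old_data : List (List Int)) (new_data : List (List Int)) : Decidable (Pre_my_dupl old_data new_data) := by unfold Pre_my_dupl; infer_instance

def pvWitness_my_dupl : List (List Int) × List (List Int) := ([[1, 2], [3, 4]], [[1, 10], [5, 6]])

def Spec_my_dupl (old_data : List (List Int)) (new_data : List (List Int)) (out : List (List Int)) : Prop := out = my_dupl_alt old_data new_data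
instance (old_data : List (List Int)) (new_data : List (List Int)) (out : List (List Int)) : Decidable (Spec_my_dupl old_data new_data out) := by unfold Spec_my_dupl; infer_instance

-- ===== CLAIM (what is proved, stated in full; the proofs are below) =====
def Claim_equal_my_dupl : Prop := ∀ (old_data : List (List Int)) (new_data : List (List Int)), Dom_my_dupl old_data new_data → Pre_my_dupl old_data new_data → Spec_my_dupl old_data new_data (my_dupl old_data new_data)

-- ===== LEMMAS AND PROOFS =====

-- the canonical "indices of rows with key k, counted from s" list
def keyIdx (nd : List (List Int)) (s k : Int) : List Int :=
  ((PySem.List.enumerate nd s).filter (fun p => pvKey p.2 == k)).map (·.1)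

theorem keyIdx_nil (s k : Int) : keyIdx [] s k = [] := rfl

theorem keyIdx_cons (r : List Int) (t : List (List Int)) (s k : Int) :
    keyIdx (r :: t) s k = if pvKey r = k then s :: keyIdx t (s + 1) k else keyIdx t (s + 1) k := by
  simp [keyIdx, PySem.List.enumerate_cons]
  split_ifs <;> simp_all

theorem pvKey_bump (r : List Int) (v : Int) : pvKey (pvBump r v) = pvKey r := by
  unfold pvBump
  match r with
  | [] => rfl
  | [a] => rfl
  | a :: b :: t => rfl

-- A's inner scan computes the map-and-any of the list
theorem myDuplScan_spec (key v : Int) (nd : List (List Int)) :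
    myDuplScan key v nd =
      (nd.map (fun r => if pvKey r = key then pvBump r v else r),
       nd.any (fun r => pvKey r == key)) := by
  induction nd with
  | nil => rfl
  | cons r t ih =>
      simp only [myDuplScan, ih, List.map_cons, List.any_cons]
      split_ifs with h <;> simp [h]

theorem keyIdx_eq_nil_iff (nd : List (List Int)) (s k : Int) :
    keyIdx nd s k = [] ↔ nd.any (fun r => pvKey r == k) = false := by
  induction nd generalizing s with
  | nil => simp [keyIdx_nil]
  | cons r t ih =>
      rw [keyIdx_cons]
      split_ifs with h <;> simp [h, ih]

theorem keyIdx_map_bump (nd : List (List Int)) (s k key v : Int) :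
    keyIdx (nd.map (fun r => if pvKey r = key then pvBump r v else r)) s k = keyIdx nd s k := by
  induction nd generalizing s with
  | nil => rfl
  | cons r t ih =>
      simp only [List.map_cons]
      rw [keyIdx_cons, keyIdx_cons]
      by_cases h : pvKey r = key
      · simp [h, pvKey_bump, ih]
      · simp [h, ih]

theorem keyIdx_append_singleton (nd : List (List Int)) (row : List Int) (s k : Int) :
    keyIdx (nd ++ [row]) s k =
      keyIdx nd s k ++ (if pvKey row = k then [s + nd.length] else []) := by
  induction nd generalizing s with
  | nil => simp [keyIdx_cons, keyIdx_nil]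
  | cons r t ih =>
      simp only [List.cons_append]
      rw [keyIdx_cons, keyIdx_cons, ih]
      have : s + 1 + (t.length : Int) = s + (t.length + 1 : Nat) := by push_cast; ring
      split_ifs <;> simp [this]

theorem map_id_of_no_match (nd : List (List Int)) (key v : Int)
    (h : nd.any (fun r => pvKey r == key) = false) :
    nd.map (fun r => if pvKey r = key then pvBump r v else r) = nd := by
  induction nd with
  | nil => rfl
  | cons r t ih =>
      simp only [List.any_cons, Bool.or_eq_false_iff, beq_eq_false_iff_ne, ne_eq] at h
      simp [h.1, ih h.2]

-- folding B's bump over exactly the matching indices rewrites the list like A's scan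
theorem foldl_bumpAt_spec (key v : Int) :
    ∀ (suf pre : List (List Int)),
      (keyIdx suf (pre.length : Int) key).foldl (fun nd j => pvBumpAt nd j v) (pre ++ suf) =
        pre ++ suf.map (fun r => if pvKey r = key then pvBump r v else r) := by
  intro suf
  induction suf with
  | nil => intro pre; simp [keyIdx_nil]
  | cons r t ih =>
      intro pre
      rw [keyIdx_cons]
      have hget : (pre ++ r :: t).getD ((pre.length : Int)).toNat [] = r := by
        simp [List.getD_eq_getElem?_getD]
      have hset : ∀ x, (pre ++ r :: t).set ((pre.length : Int)).toNat x = (pre ++ [x]) ++ t := by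
        intro x; simp
      have hlen : ∀ x : List Int, (((pre ++ [x]).length : Nat) : Int) = (pre.length : Int) + 1 := by
        intro x; simp
      by_cases h : pvKey r = key
      · rw [if_pos h, List.foldl_cons, pvBumpAt, hget, hset]
        have := ih (pre ++ [pvBump r v])
        rw [hlen] at this
        rw [this]
        simp [h]
      · rw [if_neg h]
        have := ih (pre ++ [r])
        rw [hlen] at this
        simp only [List.append_assoc, List.cons_append, List.nil_append] at this
        rw [this]
        simp [h]

-- building the index: the dictionary maps each key to exactly its occurrence indices
theorem getD_build (l : List (Int × List Int)) (d : PySem.Dict Int (List Int)) (k : Int) :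
    (l.foldl (fun d p => d.modify (pvKey p.2) [] (· ++ [p.1])) d).getD k [] =
      d.getD k [] ++ ((l.filter (fun p => pvKey p.2 == k)).map (·.1)) := by
  induction l generalizing d with
  | nil => simp
  | cons p t ih =>
      simp only [List.foldl_cons, ih, List.filter_cons]
      rw [PySem.Dict.getD_modify]
      by_cases h : k = pvKey p.2
      · rw [if_pos h, h]
        simp
      · rw [if_neg h]
        simp [Ne.symm h]

theorem idx0_spec (new_data : List (List Int)) (k : Int) :
    ((PySem.List.enumerate new_data 0).foldl
        (fun d p => d.modify (pvKey p.2) [] (· ++ [p.1])) PySem.Dict.empty).getD k [] =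
      keyIdx new_data 0 k := by
  rw [getD_build]
  simp [keyIdx]

-- main loop invariant: the dictionary is exactly the key-index table of the list
theorem main_loop (old : List (List Int)) :
    ∀ (nd : List (List Int)) (idx : PySem.Dict Int (List Int)),
      (∀ k, idx.getD k [] = keyIdx nd 0 k) →
      (old.foldl pvStepB (nd, idx)).1 =
        old.foldl
          (fun nd row =>
            let (nd', is_dupl) := myDuplScan (pvKey row) (row.getD 1 0) nd
            if is_dupl then nd' else nd' ++ [row])
          nd := by
  induction old with
  | nil => intro nd idx _; rfl
  | cons row t ih =>
      intro nd idx hinv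
      simp only [List.foldl_cons]
      rw [myDuplScan_spec]
      by_cases hmatch : nd.any (fun r => pvKey r == pvKey row) = true
      · -- some row matches: B takes the hits branch
        have hne : keyIdx nd 0 (pvKey row) ≠ [] := by
          rw [ne_eq, keyIdx_eq_nil_iff]; simp [hmatch]
        have hstep : pvStepB (nd, idx) row =
            (nd.map (fun r => if pvKey r = pvKey row then pvBump r (row.getD 1 0) else r), idx) := by
          simp only [pvStepB, hinv]
          rw [if_pos hne]
          have := foldl_bumpAt_spec (pvKey row) (row.getD 1 0) nd []
          simp only [List.nil_append, List.length_nil, Nat.cast_zero] at this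
          rw [this]
        rw [hstep, ih _ _ (fun k => by rw [hinv, ← keyIdx_map_bump nd 0 k (pvKey row) (row.getD 1 0)]),
          if_pos hmatch]
      · -- no match: B appends and registers the new index
        simp only [Bool.not_eq_true] at hmatch
        have hnil : idx.getD (pvKey row) [] = [] := by
          rw [hinv, keyIdx_eq_nil_iff]; exact hmatch
        have hstep : pvStepB (nd, idx) row =
            (nd ++ [row], idx.insert (pvKey row) [(nd.length : Int)]) := by
          simp [pvStepB, hnil]
        have hinv' : ∀ k, (idx.insert (pvKey row) [(nd.length : Int)]).getD k [] =
            keyIdx (nd ++ [row]) 0 k := by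
          intro k
          rw [PySem.Dict.getD_insert, keyIdx_append_singleton]
          by_cases hk : k = pvKey row
          · have h0 : keyIdx nd 0 (pvKey row) = [] := by
              rw [keyIdx_eq_nil_iff]; exact hmatch
            rw [if_pos hk, hk, if_pos rfl, h0]
            simp
          · rw [if_neg hk, hinv, if_neg (fun h => hk h.symm)]
            simp
        rw [hstep, ih _ _ hinv']
        simp only [hmatch, Bool.false_eq_true, if_false]
        rw [map_id_of_no_match nd (pvKey row) _ hmatch]

-- ===== VERDICT (by name: the statement is the Claim_ definition above) =====
theorem my_dupl_spec : Claim_equal_my_dupl := by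
  intro old_data new_data _ _
  unfold Spec_my_dupl my_dupl my_dupl_alt
  match old_data with
  | [] => rfl
  | r :: t =>
      exact (main_loop (r :: t) new_data _ (fun k => idx0_spec new_data k)).symm
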